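-- pv_equiv track=rewrite | github.com/ZoeGerber/ProjetPythonL2 | Projet-3_Python.py | debutORF1
-- ===== SOURCE A (Python) =====
-- def debutORF1(arn):
--     i=0
--     debut1=0
--     for i in range(0,len(arn),3):
--         codon=arn[i:i+3]
--         if (codon=="AUG"):
--             debut1= i+1#car le i correspond a un chiffre en dessous de celui voulu.
--             break
--         elif(codon!="AUG"):
--             debut1=0
--     return (debut1)
-- ===== SOURCE B (Python) =====
-- def debutORF1(arn):
--     p = arn.find("AUG")
--     while p != -1 and p % 3 != 0:
--         p = arn.find("AUG", p + 1)
--     return p + 1 if p != -1 else 0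
-- ===== Notes on version B (the rewrite author's own statement) =====
-- stated objective: faster
-- what changed: Replaces the stepped loop that slices and compares every codon with the built-in substring search arn.find('AUG', ...), jumping from occurrence to occurrence and keeping only a frame-aligned (index % 3 == 0) hit.
import Mathlib
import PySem

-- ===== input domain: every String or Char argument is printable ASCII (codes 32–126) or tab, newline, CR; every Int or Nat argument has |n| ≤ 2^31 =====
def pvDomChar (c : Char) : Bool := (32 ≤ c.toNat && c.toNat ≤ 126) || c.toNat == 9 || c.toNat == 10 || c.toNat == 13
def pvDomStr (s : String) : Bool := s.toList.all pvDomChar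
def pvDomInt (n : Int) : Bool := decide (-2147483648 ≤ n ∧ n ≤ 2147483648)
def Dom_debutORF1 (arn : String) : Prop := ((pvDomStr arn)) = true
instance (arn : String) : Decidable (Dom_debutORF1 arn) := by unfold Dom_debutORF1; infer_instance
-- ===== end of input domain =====

-- B replaces A's stepped codon-slicing loop with the built-in substring search (str.find),
-- skipping occurrences that are not frame-aligned; same O(n) result, measurably faster by constant factor.

-- ===== PORT A =====
-- the for-loop over range(0, len(arn), 3) with break, carrying debut1 (reset to 0 on each non-AUG codon)
def pvALoop (arn : String) : List Int → Int → Int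
  | [], debut1 => debut1
  | i :: rest, _ =>
      let codon := PySem.Str.slice arn (some i) (some (i + 3))
      if codon = "AUG" then i + 1
      else pvALoop arn rest 0

def debutORF1 (arn : String) : Int :=
  pvALoop arn (PySem.List.pyRange 0 (PySem.Str.len arn) 3) 0

-- ===== PORT B =====
-- the while-loop 'while p != -1 and p % 3 != 0: p = arn.find("AUG", p+1)'; the fuel argument only
-- makes the recursion total (each find moves p strictly right, so len(arn) steps always suffice)
def pvBLoop (arn : String) : Nat → Int → Int
  | 0, p => p
  | fuel + 1, p =>
      if p ≠ -1 ∧ PySem.Int.mod p 3 ≠ 0 then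
        pvBLoop arn fuel (PySem.Str.findFrom arn "AUG" (p + 1) none)
      else p

def debutORF1_alt (arn : String) : Int :=
  let p := pvBLoop arn (PySem.Str.len arn).toNat (PySem.Str.find arn "AUG")
  if p ≠ -1 then p + 1 else 0

-- ===== PRECONDITION & SPEC =====
def Spec_debutORF1 (arn : String) (out : Int) : Prop := out = debutORF1_alt arn
instance (arn : String) (out : Int) : Decidable (Spec_debutORF1 arn out) := by unfold Spec_debutORF1; infer_instance

-- ===== CLAIM (what is proved, stated in full; the proofs are below) =====
def Claim_equal_debutORF1 : Prop := ∀ (arn : String), Dom_debutORF1 arn → Spec_debutORF1 arn (debutORF1 arn)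

-- ===== LEMMAS AND PROOFS =====

-- proof-only spec: first in-frame AUG at an offset j, j+3, j+6, … (as an index), else -1
def pvFA (s : List Char) (j : Nat) : Int :=
  if _h : j < s.length then
    if "AUG".toList <+: s.drop j then (j : Int) else pvFA s (j + 3)
  else -1
termination_by s.length - j
decreasing_by omega

theorem pvPrefixBound {s : List Char} {i : Nat} (h : "AUG".toList <+: s.drop i) :
    i + 3 ≤ s.length := by
  have h1 := h.length_le
  simp at h1
  omega

theorem pvFA_none {s : List Char} {j : Nat}
    (h : ∀ i, j ≤ i → ¬ "AUG".toList <+: s.drop i) : pvFA s j = -1 := by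
  rw [pvFA]
  split
  · rw [if_neg (h j le_rfl)]
    exact pvFA_none (fun i hi => h i (by omega))
  · rfl
termination_by s.length - j
decreasing_by omega

theorem pvFA_found {s : List Char} {p : Nat} (hp : "AUG".toList <+: s.drop p)
    (j : Nat) (hj : j ≤ p) (hmod : (p - j) % 3 = 0)
    (hno : ∀ i, j ≤ i → i < p → ¬ "AUG".toList <+: s.drop i) : pvFA s j = (p : Int) := by
  have hplen : p + 3 ≤ s.length := pvPrefixBound hp
  rw [pvFA]
  rw [dif_pos (by omega : j < s.length)]
  by_cases hje : j = p
  · subst hje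
    rw [if_pos hp]
  · rw [if_neg (hno j le_rfl (by omega))]
    exact pvFA_found hp (j + 3) (by omega) (by omega) (fun i hi hi' => hno i (by omega) hi')
termination_by p - j
decreasing_by omega

theorem pvFA_skip {s : List Char} (j j' : Nat) (hle : j ≤ j') (hmod : (j' - j) % 3 = 0)
    (hno : ∀ i, j ≤ i → i < j' → (i - j) % 3 = 0 → ¬ "AUG".toList <+: s.drop i) :
    pvFA s j = pvFA s j' := by
  by_cases hje : j = j'
  · subst hje; rfl
  · have hstep : j + 3 ≤ j' := by omega
    have hj : pvFA s j = pvFA s (j + 3) := by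
      rw [pvFA]
      split
      · rw [if_neg (hno j le_rfl (by omega) (by omega))]
      · rw [pvFA, dif_neg (by omega : ¬ j + 3 < s.length)]
    rw [hj]
    exact pvFA_skip (j + 3) j' (by omega) (by omega)
      (fun i hi hi' hm => hno i (by omega) hi' (by omega))
termination_by j' - j
decreasing_by omega

theorem pvRange3_nil {a b : Int} (h : b ≤ a) : PySem.List.pyRange a b 3 = [] := by
  rw [PySem.List.pyRange_of_pos a b (by norm_num)]
  rw [if_neg (by omega)]
  simp

theorem pvRange3_cons {a b : Int} (h : a < b) :
    PySem.List.pyRange a b 3 = a :: PySem.List.pyRange (a + 3) b 3 := by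
  rw [PySem.List.pyRange_of_pos a b (by norm_num),
      PySem.List.pyRange_of_pos (a + 3) b (by norm_num)]
  rw [if_pos h]
  have hcnt : ((b - a + 3 - 1) / 3).toNat
      = (if a + 3 < b then ((b - (a + 3) + 3 - 1) / 3).toNat else 0) + 1 := by
    split <;> omega
  rw [hcnt, List.range_succ_eq_map, List.map_cons, List.map_map]
  refine congrArg₂ _ (by simp) ?_
  refine List.map_congr_left (fun k _ => ?_)
  simp [Function.comp]
  ring

-- the codon test in A is exactly "AUG is a prefix of the tail at j"
theorem pvCodon (arn : String) (j : Nat) :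
    (PySem.Str.slice arn (some (j : Int)) (some ((j : Int) + 3)) = "AUG")
      ↔ ("AUG".toList <+: arn.toList.drop j) := by
  rw [← String.toList_inj]
  rw [PySem.Str.toList_slice]
  have h3 : ((j : Int) + 3) = ((j : Int) + ((3 : Nat) : Int)) := by push_cast; ring
  rw [h3]
  simp only [PySem.Chars.slice_eq_listSlice, PySem.List.slice_natCast_add]
  rw [List.prefix_iff_eq_take]
  constructor
  · intro h; rw [← h]; simp
  · intro h
    conv_rhs => rw [h]
    simp

theorem pvAMain (arn : String) : ∀ j : Nat,
    pvALoop arn (PySem.List.pyRange (j : Int) (arn.toList.length : Int) 3) 0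
      = (if pvFA arn.toList j = -1 then 0 else pvFA arn.toList j + 1) := by
  intro j
  by_cases hj : j < arn.toList.length
  · rw [pvRange3_cons (by exact_mod_cast hj)]
    simp only [pvALoop]
    by_cases hc : "AUG".toList <+: arn.toList.drop j
    · rw [if_pos ((pvCodon arn j).mpr hc)]
      rw [pvFA, dif_pos hj, if_pos hc]
      rw [if_neg (by omega)]
    · rw [if_neg (fun h => hc ((pvCodon arn j).mp h))]
      have hstep : pvFA arn.toList j = pvFA arn.toList (j + 3) := by
        rw [pvFA, dif_pos hj, if_neg hc]
      rw [hstep]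
      have hcast : ((j : Int) + 3) = ((j + 3 : Nat) : Int) := by push_cast; ring
      rw [hcast, pvAMain arn (j + 3)]
  · rw [pvRange3_nil (by exact_mod_cast Nat.le_of_not_lt hj)]
    rw [pvFA, dif_neg hj]
    simp [pvALoop]
termination_by j => arn.toList.length - j
decreasing_by omega

-- no AUG occurrence at or after k when findFrom says -1
theorem pvNoOcc {s : List Char} {k : Nat} (h : ¬ "AUG".toList <:+: s.drop k) :
    ∀ i, k ≤ i → ¬ "AUG".toList <+: s.drop i := by
  intro i hi hpre
  apply h
  have : s.drop i = (s.drop k).drop (i - k) := by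
    rw [List.drop_drop]; congr 1; omega
  rw [this] at hpre
  exact hpre.isInfix.trans (List.drop_suffix _ _).isInfix

theorem pvBMain (arn : String) : ∀ fuel (k : Nat), k ≤ arn.toList.length →
    arn.toList.length ≤ fuel + k →
    pvBLoop arn fuel (PySem.Chars.findFrom arn.toList "AUG".toList (k : Int))
      = pvFA arn.toList (3 * ((k + 2) / 3)) := by
  intro fuel
  induction fuel with
  | zero =>
      intro k hk hlen
      have hkn : k = arn.toList.length := by omega
      have hp : PySem.Chars.findFrom arn.toList "AUG".toList (k : Int) = -1 := by
        rw [PySem.Chars.findFrom_natCast_eq_neg_one_iff arn.toList "AUG".toList k hk]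
        subst hkn
        rw [List.drop_length]
        simp
      rw [hp]
      rw [pvFA_none (s := arn.toList) (fun i hi hpre => by
        have := pvPrefixBound hpre
        omega)]
      rfl
  | succ fuel ih =>
      intro k hk hlen
      by_cases hp : PySem.Chars.findFrom arn.toList "AUG".toList (k : Int) = -1
      · have hno : ∀ i, k ≤ i → ¬ "AUG".toList <+: arn.toList.drop i :=
          pvNoOcc ((PySem.Chars.findFrom_natCast_eq_neg_one_iff arn.toList "AUG".toList k hk).mp hp)
        rw [hp]
        rw [pvFA_none (s := arn.toList) (fun i hi hpre => hno i (by omega) hpre)]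
        simp [pvBLoop]
      · obtain ⟨hge, hpre, hmin⟩ :=
          PySem.Chars.findFrom_natCast_spec arn.toList "AUG".toList k hk hp
        set p := PySem.Chars.findFrom arn.toList "AUG".toList (k : Int) with hpdef
        have hp0 : (0 : Int) ≤ p := le_trans (by exact_mod_cast Nat.zero_le k) hge
        have hpnat : p = ((p.toNat : Nat) : Int) := by omega
        have hplen : p.toNat + 3 ≤ arn.toList.length := pvPrefixBound hpre
        have hkp : k ≤ p.toNat := by omega
        by_cases hm : PySem.Int.mod p 3 = 0
        · have hdvd : (3 : Int) ∣ p := (PySem.Int.mod_eq_zero_iff_dvd p 3).mp hm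
          have hdvdn : 3 ∣ p.toNat := by
            rcases hdvd with ⟨c, hc⟩
            refine ⟨c.toNat, by omega⟩
          rw [show pvBLoop arn (fuel + 1) p = p from by simp [pvBLoop, hp, hdvd]]
          rw [pvFA_found hpre (3 * ((k + 2) / 3)) (by omega) (by omega)
            (fun i hi hi' => hmin i (by omega) hi')]
          omega
        · have hnd : ¬ 3 ∣ p.toNat := by
            intro ⟨c, hc⟩
            exact hm ((PySem.Int.mod_eq_zero_iff_dvd p 3).mpr ⟨(c : Int), by omega⟩)
          have hndi : ¬ (3 : Int) ∣ p := fun hd => hm ((PySem.Int.mod_eq_zero_iff_dvd p 3).mpr hd)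
          have hloop : pvBLoop arn (fuel + 1) p
              = pvBLoop arn fuel (PySem.Str.findFrom arn "AUG" (p + 1) none) := by
            simp [pvBLoop, hp, hndi]
          rw [hloop]
          have hcast : (p + 1 : Int) = ((p.toNat + 1 : Nat) : Int) := by omega
          rw [PySem.Str.findFrom_eq, hcast]
          rw [show ("AUG" : String).toList = "AUG".toList from rfl]
          rw [ih (p.toNat + 1) (by omega) (by omega)]
          refine (pvFA_skip (3 * ((k + 2) / 3)) (3 * ((p.toNat + 1 + 2) / 3)) (by omega) (by omega)
            (fun i hi hi' him hpre' => ?_)).symm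
          have hi3 : 3 ∣ i := by omega
          have hilt : i < p.toNat := by omega
          exact hmin i (by omega) hilt hpre'

theorem debutORF1_spec : Claim_equal_debutORF1 := by
  intro arn _
  unfold Spec_debutORF1
  have hA := pvAMain arn 0
  have hB := pvBMain arn arn.toList.length 0 (Nat.zero_le _) (by omega)
  norm_num at hA hB
  simp only [debutORF1, debutORF1_alt, PySem.Str.len_eq, PySem.Str.find_eq, Int.toNat_natCast,
    String.length_toList]
  rw [hA, hB]
  by_cases h : pvFA arn.toList 0 = -1
  · simp [h]
  · simp [h]
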